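-- pv_equiv track=rewrite | github.com/UWPCE-PythonCert-ClassRepos/Self_Paced-Online | students/Chris_Kenyon/Lesson_4/Trigrams.py | create_trigram_dict
-- ===== SOURCE A (Python) =====
-- def create_trigram_dict(parsed_book):
--     """Create a trigram dictionary using 3 word groups"""
--     justwords = parsed_book.split(" ")
--     trigrams = {}
--     keywords = [None, None]
--     start_ind = 0
--     for word in justwords:
--         if word == "":
--             continue
--         if None in keywords:
--             keywords[start_ind] = word
--             start_ind += 1
--         else:
--             bi_key = keywords[0] + " " + keywords[1]
--             if bi_key not in trigrams:
--                 trigrams[bi_key] = [word]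
--             else:
--                 trigrams[bi_key] += [word]
--             keywords[0] = keywords[1]
--             keywords[1] = word
--     return trigrams
-- ===== SOURCE B (Python) =====
-- def create_trigram_dict(parsed_book):
--     """Create a trigram dictionary using 3 word groups"""
--     words = [w for w in parsed_book.split(' ') if w != '']
--     trigrams = {}
--     for a, b, c in zip(words, words[1:], words[2:]):
--         trigrams.setdefault(a + ' ' + b, []).append(c)
--     return trigrams
-- ===== Notes on version B (the rewrite author's own statement) =====
-- stated objective: idiomatic
-- what changed: Drops the None-sentinel sliding-window state machine over raw tokens in favour of pre-filtering the word list and iterating zip over consecutive triples with setdefault.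
import Mathlib
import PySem

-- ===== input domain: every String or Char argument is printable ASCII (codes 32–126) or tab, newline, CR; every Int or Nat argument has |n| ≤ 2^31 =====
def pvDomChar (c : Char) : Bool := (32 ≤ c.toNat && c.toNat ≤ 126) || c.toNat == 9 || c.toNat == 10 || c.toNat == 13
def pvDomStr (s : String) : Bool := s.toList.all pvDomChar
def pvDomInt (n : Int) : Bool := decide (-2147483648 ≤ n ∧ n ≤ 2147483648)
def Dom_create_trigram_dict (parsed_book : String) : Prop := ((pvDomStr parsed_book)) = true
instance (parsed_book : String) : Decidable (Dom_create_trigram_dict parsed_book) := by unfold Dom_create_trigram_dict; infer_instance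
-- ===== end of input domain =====

-- B replaces A's None-sentinel sliding-window state machine with a pre-filtered
-- word list traversed by zip over consecutive triples (more idiomatic; same cost).

-- ===== PORT A =====
-- state: (trigrams, keywords as pair of Option String, start_ind)
def trigStepA (st : PySem.Dict String (List String) × (Option String × Option String) × Int)
    (word : String) :
    PySem.Dict String (List String) × (Option String × Option String) × Int :=
  if word == "" then st
  else if st.2.1.1 == none || st.2.1.2 == none then
    -- keywords[start_ind] = word; start_ind += 1  (start_ind is 0 or 1 here)
    (st.1, (if st.2.2 == 0 then (some word, st.2.1.2) else (st.2.1.1, some word)), st.2.2 + 1)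
  else
    match st.2.1 with
    | (some k0, some k1) =>
        let bi_key := k0 ++ " " ++ k1
        ((if st.1.contains bi_key
            then st.1.insert bi_key (st.1.getD bi_key [] ++ [word])   -- trigrams[bi_key] += [word]
            else st.1.insert bi_key [word]),
         (some k1, some word), st.2.2)
    | _ => st  -- unreachable: the guard ensured both keywords are set

def create_trigram_dict (parsed_book : String) : List (String × List String) :=
  let justwords := (PySem.Str.split? parsed_book " ").getD []
  (justwords.foldl trigStepA (PySem.Dict.empty, (none, none), 0)).1.items

-- ===== PORT B =====
-- trigrams.setdefault(a + ' ' + b, []).append(c)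
def trigStepB (d : PySem.Dict String (List String)) (t : String × String × String) :
    PySem.Dict String (List String) :=
  let key := t.1 ++ " " ++ t.2.1
  let d1 := d.setdefault key []
  d1.insert key (d1.getD key [] ++ [t.2.2])

def create_trigram_dict_alt (parsed_book : String) : List (String × List String) :=
  let words := ((PySem.Str.split? parsed_book " ").getD []).filter (fun w => w != "")
  ((words.zip ((words.tail).zip (words.tail.tail))).foldl trigStepB PySem.Dict.empty).items

-- ===== PRECONDITION & SPEC =====
def Spec_create_trigram_dict (parsed_book : String) (out : List (String × List String)) : Prop := out = create_trigram_dict_alt parsed_book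
instance (parsed_book : String) (out : List (String × List String)) : Decidable (Spec_create_trigram_dict parsed_book out) := by unfold Spec_create_trigram_dict; infer_instance

-- ===== CLAIM (what is proved, stated in full; the proofs are below) =====
def Claim_equal_create_trigram_dict : Prop := ∀ (parsed_book : String), Dom_create_trigram_dict parsed_book → Spec_create_trigram_dict parsed_book (create_trigram_dict parsed_book)

-- ===== LEMMAS AND PROOFS =====

-- A's loop skips empty words, so folding over the raw token list equals folding over the filtered one.
lemma foldA_filter (l : List String) :
    ∀ st, l.foldl trigStepA st = (l.filter (fun w => w != "")).foldl trigStepA st := by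
  induction l with
  | nil => intro st; rfl
  | cons w l ih =>
      intro st
      by_cases hw : w = ""
      · subst hw
        simpa [List.foldl, trigStepA] using ih st
      · simp [List.foldl, hw, ih]

-- one A-step with a full window updates the dict exactly as one B-step on the triple
lemma step_dict_eq (d : PySem.Dict String (List String)) (a b c : String) :
    (if d.contains (a ++ " " ++ b)
       then d.insert (a ++ " " ++ b) (d.getD (a ++ " " ++ b) [] ++ [c])
       else d.insert (a ++ " " ++ b) [c]) = trigStepB d (a, b, c) := by
  by_cases h : d.contains (a ++ " " ++ b) = true
  · simp [trigStepB, h, PySem.Dict.setdefault_of_contains _ _ h]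
  · have h' : d.contains (a ++ " " ++ b) = false := by simpa using h
    simp [trigStepB, h', PySem.Dict.setdefault_of_not_contains _ _ h',
      PySem.Dict.getD_insert_self, PySem.Dict.insert_insert_self]

-- once the window holds (a, b), running A over the remaining (nonempty) words
-- is B's fold over the consecutive triples of a :: b :: ws
lemma run_full (ws : List String) :
    ∀ (d : PySem.Dict String (List String)) (a b : String) (si : Int),
      (∀ w ∈ ws, w ≠ "") →
      (ws.foldl trigStepA (d, (some a, some b), si)).1
        = ((a :: b :: ws).zip ((b :: ws).zip ws)).foldl trigStepB d := by
  induction ws with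
  | nil => intro d a b si _; rfl
  | cons c rest ih =>
      intro d a b si hne
      have hc : c ≠ "" := hne c (by simp)
      have hrest : ∀ w ∈ rest, w ≠ "" := fun w hw => hne w (by simp [hw])
      have hstep : trigStepA (d, (some a, some b), si) c
          = (trigStepB d (a, b, c), (some b, some c), si) := by
        simp [trigStepA, hc, ← step_dict_eq]
      calc ((c :: rest).foldl trigStepA (d, (some a, some b), si)).1
          = (rest.foldl trigStepA (trigStepB d (a, b, c), (some b, some c), si)).1 := by
            simp [List.foldl, hstep]
        _ = ((b :: c :: rest).zip ((c :: rest).zip rest)).foldl trigStepB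
              (trigStepB d (a, b, c)) := ih _ b c si hrest
        _ = ((a :: b :: c :: rest).zip ((b :: c :: rest).zip (c :: rest))).foldl trigStepB d := by
            simp [List.zip]

-- the whole run on a filtered word list
lemma run_eq (ws : List String) (h : ∀ w ∈ ws, w ≠ "") :
    (ws.foldl trigStepA (PySem.Dict.empty, (none, none), 0)).1
      = ((ws.zip ((ws.tail).zip (ws.tail.tail))).foldl trigStepB PySem.Dict.empty) := by
  match ws with
  | [] => rfl
  | [a] =>
      have ha := h a (by simp)
      simp [List.foldl, trigStepA, ha]
  | a :: b :: rest =>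
      have ha := h a (by simp)
      have hb := h b (by simp)
      have hrest : ∀ w ∈ rest, w ≠ "" := fun w hw => h w (by simp [hw])
      have h2 : (a :: b :: rest).foldl trigStepA (PySem.Dict.empty, (none, none), 0)
          = rest.foldl trigStepA (PySem.Dict.empty, (some a, some b), 2) := by
        simp [List.foldl, trigStepA, ha, hb]
      rw [h2, run_full rest PySem.Dict.empty a b 2 hrest]
      rfl

-- ===== VERDICT (by name: the statement is the Claim_ definition above) =====
theorem create_trigram_dict_spec : Claim_equal_create_trigram_dict := by
  intro parsed_book _
  unfold Spec_create_trigram_dict create_trigram_dict create_trigram_dict_alt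
  dsimp only
  rw [foldA_filter]
  have h : ∀ w ∈ ((PySem.Str.split? parsed_book " ").getD []).filter (fun w => w != ""), w ≠ "" := by
    intro w hw
    simpa using (List.of_mem_filter hw)
  rw [run_eq _ h]
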